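-- pv_equiv track=rewrite | github.com/jonathonwaughon/Financial-Analysis-Forge | main/core/global_state.py | _split_path
-- ===== SOURCE A (Python) =====
-- def _split_path(path: str) -> list[str]:
--     """
--     Splits a dot-path like:
--         "income_statement.2025 FY.Revenue"
--
--     Supports escaping dots in key names:
--         "some_key_with_dot\\.inside.child"
--     """
--     if not isinstance(path, str) or not path:
--         return []
--
--     parts = []
--     buf = []
--     escaped = False
--
--     for ch in path:
--         if escaped:
--             buf.append(ch)
--             escaped = False
--             continue
--
--         if ch == "\\":
--             escaped = True
--             continue
--
--         if ch == ".":
--             parts.append("".join(buf))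
--             buf = []
--             continue
--
--         buf.append(ch)
--
--     parts.append("".join(buf))
--     return [p for p in parts if p != ""]
-- ===== SOURCE B (Python) =====
-- def _split_path(path: str) -> list[str]:
--     if not isinstance(path, str) or not path:
--         return []
--     segs = []
--     i, n = 0, len(path)
--     while i < n:
--         seg = []
--         while i < n and path[i] != '.':
--             if path[i] == '\\':
--                 if i + 1 < n:
--                     seg.append(path[i + 1])
--                 i += 2
--             else:
--                 seg.append(path[i])
--                 i += 1
--         i += 1  # step past the dot (or past the end)
--         if seg:
--             segs.append(''.join(seg))
--     return segs
-- ===== Notes on version B (the rewrite author's own statement) =====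
-- stated objective: alternative
-- what changed: A's single-pass escaped-boolean state machine (collect every part including empties, filter empties at the end) is replaced by a nested segment scanner that consumes escape pairs by one-char lookahead, skips the dot between segments, and drops empty segments as it goes, with no escape flag and no final filter.
import Mathlib
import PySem

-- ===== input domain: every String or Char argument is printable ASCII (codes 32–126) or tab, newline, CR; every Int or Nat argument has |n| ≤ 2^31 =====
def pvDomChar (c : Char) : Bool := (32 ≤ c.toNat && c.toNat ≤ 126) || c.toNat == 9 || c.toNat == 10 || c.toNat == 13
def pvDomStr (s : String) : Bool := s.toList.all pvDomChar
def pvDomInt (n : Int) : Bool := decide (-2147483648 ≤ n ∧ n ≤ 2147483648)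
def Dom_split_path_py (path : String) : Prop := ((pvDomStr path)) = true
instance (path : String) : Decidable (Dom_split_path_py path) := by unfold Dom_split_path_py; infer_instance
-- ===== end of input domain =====

-- B replaces A's escaped-flag state machine (collect all parts, filter empties at end)
-- with a nested segment scanner that consumes escape pairs by lookahead and skips empty
-- segments as it goes; objective: alternative structure, same cost.

-- ===== PORT A =====
-- the body of A's for loop, on state (parts, buf, escaped)
def pvStepA (st : List String × List Char × Bool) (ch : Char) : List String × List Char × Bool :=
  if st.2.2 then (st.1, st.2.1 ++ [ch], false)
  else if ch = '\\' then (st.1, st.2.1, true)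
  else if ch = '.' then (st.1 ++ [String.ofList st.2.1], [], false)
  else (st.1, st.2.1 ++ [ch], false)

-- literal port of A: the guard, the for loop, the final append, the non-empty filter
def split_path_py (path : String) : List String :=
  if path = "" then []
  else
    let st := path.toList.foldl pvStepA ([], [], false)
    (st.1 ++ [String.ofList st.2.1]).filter (fun p => p ≠ "")

-- ===== PORT B =====
-- B's inner while loop: scan one segment, unescaping by lookahead; returns
-- (segment, rest), rest starting at the terminating dot ([] if the end was reached).
def pvScanSeg : List Char → List Char × List Char
  | [] => ([], [])
  | '.' :: rest => ([], '.' :: rest)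
  | '\\' :: [] => ([], [])
  | '\\' :: c :: rest => (c :: (pvScanSeg rest).1, (pvScanSeg rest).2)
  | c :: rest => (c :: (pvScanSeg rest).1, (pvScanSeg rest).2)

theorem pvScanSeg_len (cs : List Char) : (pvScanSeg cs).2.length ≤ cs.length := by
  fun_induction pvScanSeg cs <;> simp_all <;> omega

-- B's outer while loop: one segment per iteration, skip the dot, drop empty segments
def pvSegs : List Char → List String
  | [] => []
  | c :: rest =>
    (if (pvScanSeg (c :: rest)).1 = [] then [] else [String.ofList (pvScanSeg (c :: rest)).1])
      ++ pvSegs (pvScanSeg (c :: rest)).2.tail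
termination_by cs => cs.length
decreasing_by
  have h := pvScanSeg_len (c :: rest)
  simp only [List.length_tail, List.length_cons] at *
  omega

def split_path_py_alt (path : String) : List String :=
  if path = "" then [] else pvSegs path.toList

-- ===== PRECONDITION & SPEC =====
def Spec_split_path_py (path : String) (out : List String) : Prop := out = split_path_py_alt path
instance (path : String) (out : List String) : Decidable (Spec_split_path_py path out) := by unfold Spec_split_path_py; infer_instance

-- ===== CLAIM (what is proved, stated in full; the proofs are below) =====
def Claim_equal_split_path_py : Prop := ∀ (path : String), Dom_split_path_py path → Spec_split_path_py path (split_path_py path)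

-- ===== LEMMAS AND PROOFS =====

def pvConsHeadL (u : List Char) : List (List Char) → List (List Char)
  | [] => [u]
  | h :: t => (u ++ h) :: t

-- reference semantics: the (still unfiltered, already unescaped) parts of a char list
def pvParts : List Char → List (List Char)
  | [] => [[]]
  | '.' :: rest => [] :: pvParts rest
  | '\\' :: [] => [[]]
  | '\\' :: c :: rest => pvConsHeadL [c] (pvParts rest)
  | c :: rest => pvConsHeadL [c] (pvParts rest)

theorem pvConsHeadL_ne_nil (u : List Char) (ps : List (List Char)) : pvConsHeadL u ps ≠ [] := by
  cases ps <;> simp [pvConsHeadL]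

theorem pvParts_ne_nil (cs : List Char) : pvParts cs ≠ [] := by
  rw [pvParts.eq_def]; split <;> simp [pvConsHeadL_ne_nil]

theorem pvConsHeadL_nil (ps : List (List Char)) (h : ps ≠ []) : pvConsHeadL [] ps = ps := by
  cases ps <;> simp_all [pvConsHeadL]

theorem pvConsHeadL_cons2 (c : Char) (u : List Char) (ps : List (List Char)) :
    pvConsHeadL [c] (pvConsHeadL u ps) = pvConsHeadL (c :: u) ps := by
  cases ps <;> simp [pvConsHeadL]

theorem pvConsHeadL_cons (u : List Char) (c : Char) (ps : List (List Char)) :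
    pvConsHeadL u (pvConsHeadL [c] ps) = pvConsHeadL (u ++ [c]) ps := by
  cases ps <;> simp [pvConsHeadL]

theorem pvParts_cons (c : Char) (rest : List Char) (h1 : c ≠ '.') (h2 : c ≠ '\\') :
    pvParts (c :: rest) = pvConsHeadL [c] (pvParts rest) := by
  rw [pvParts.eq_def]; split <;> simp_all

-- A's fold computes pvParts (with the running buffer prefixed onto the head)
theorem pvFoldA (cs : List Char) : ∀ (parts : List String) (buf : List Char),
    ((cs.foldl pvStepA (parts, buf, false)).1
      ++ [String.ofList (cs.foldl pvStepA (parts, buf, false)).2.1])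
    = parts ++ (pvConsHeadL buf (pvParts cs)).map String.ofList := by
  fun_induction pvParts cs with
  | case1 => intro parts buf; simp [pvConsHeadL]
  | case2 rest ih =>
    intro parts buf
    rw [List.foldl_cons, show pvStepA (parts, buf, false) '.' = (parts ++ [String.ofList buf], [], false) from by simp [pvStepA]]
    rw [ih (parts ++ [String.ofList buf]) []]
    rw [pvConsHeadL_nil _ (pvParts_ne_nil rest)]
    cases h : pvParts rest with
    | nil => exact absurd h (pvParts_ne_nil rest)
    | cons p ps => simp [pvConsHeadL]
  | case3 => intro parts buf; simp [pvConsHeadL, pvStepA]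
  | case4 c rest ih =>
    intro parts buf
    rw [List.foldl_cons, show pvStepA (parts, buf, false) '\\' = (parts, buf, true) from by simp [pvStepA]]
    rw [List.foldl_cons, show pvStepA (parts, buf, true) c = (parts, buf ++ [c], false) from by simp [pvStepA]]
    rw [ih parts (buf ++ [c]), pvConsHeadL_cons]
  | case5 c rest hd hb1 hb2 ih =>
    intro parts buf
    have hc : c ≠ '\\' := by
      intro h
      cases rest with
      | nil => exact (hb1 h rfl)
      | cons a b => exact (hb2 a b h rfl)
    have hstep : pvStepA (parts, buf, false) c = (parts, buf ++ [c], false) := by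
      unfold pvStepA; simp [hc]; exact hd
    rw [List.foldl_cons, hstep, ih parts (buf ++ [c]), pvConsHeadL_cons]

-- shape of the rest after a segment scan: empty, or starting at the terminating dot
theorem pvScanSeg_rest (cs : List Char) :
    (pvScanSeg cs).2 = [] ∨ ∃ t, (pvScanSeg cs).2 = '.' :: t := by
  fun_induction pvScanSeg cs <;> simp_all

-- the scanner vs. the reference semantics
theorem pvScanSeg_parts (cs : List Char) :
    pvParts cs = pvConsHeadL (pvScanSeg cs).1 (pvParts (pvScanSeg cs).2) := by
  fun_induction pvScanSeg cs with
  | case1 => simp [pvParts, pvConsHeadL]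
  | case2 rest => exact (pvConsHeadL_nil _ (pvParts_ne_nil _)).symm
  | case3 => simp [pvParts, pvConsHeadL]
  | case4 c rest ih =>
    dsimp only
    rw [show pvParts ('\\' :: c :: rest) = pvConsHeadL [c] (pvParts rest) from rfl, ih,
      pvConsHeadL_cons2]
  | case5 c rest hd hb1 hb2 ih =>
    dsimp only
    have hc : c ≠ '\\' := by
      intro h
      cases rest with
      | nil => exact (hb1 h rfl)
      | cons a b => exact (hb2 a b h rfl)
    rw [pvParts_cons c rest (fun h => hd h) hc, ih, pvConsHeadL_cons2]

theorem pvSegs_parts (cs : List Char) :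
    pvSegs cs = ((pvParts cs).filter (fun p => p ≠ [])).map String.ofList := by
  fun_induction pvSegs cs with
  | case1 => simp [pvParts]
  | case2 c rest ih =>
    rw [pvScanSeg_parts (c :: rest)]
    rcases pvScanSeg_rest (c :: rest) with h | ⟨t, h⟩
    · rw [h] at *
      rw [show pvParts ([] : List Char) = [[]] from rfl]
      cases hs : (pvScanSeg (c :: rest)).1 <;>
        simp_all [pvConsHeadL, pvSegs]
    · rw [h] at ih ⊢
      simp only [List.tail_cons] at ih
      rw [show pvParts ('.' :: t) = [] :: pvParts t from rfl]
      cases hs : (pvScanSeg (c :: rest)).1 <;>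
        simp_all [pvConsHeadL]

theorem pvFilter_ofList (l : List (List Char)) :
    (l.map String.ofList).filter (fun p => p ≠ "") = (l.filter (fun p => p ≠ [])).map String.ofList := by
  induction l with
  | nil => rfl
  | cons h t ih =>
    by_cases hh : h = [] <;> simp_all

-- ===== VERDICT (by name: the statement is the Claim_ definition above) =====
theorem split_path_py_spec : Claim_equal_split_path_py := by
  intro path _
  unfold Spec_split_path_py split_path_py split_path_py_alt
  by_cases h : path = ""
  · simp [h]
  · simp only [h, if_false]
    rw [pvFoldA path.toList [] []]
    rw [pvConsHeadL_nil _ (pvParts_ne_nil _)]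
    simp only [List.nil_append]
    rw [pvFilter_ofList, pvSegs_parts]
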